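-- pv_equiv track=rewrite | github.com/clio-vega/proofs | verify_multiplicity_bundle.py | crystal_ei
-- ===== SOURCE A (Python) =====
-- def crystal_ei(b, i, n, k):
--     """Apply e_i using signature rule for sl_n on a k-tuple."""
--     signs = []
--     positions = []
--     for pos in range(k):
--         if b[pos] == i:
--             signs.append('+')
--             positions.append(pos)
--         elif b[pos] == i+1:
--             signs.append('-')
--             positions.append(pos)
--     if not signs:
--         return None
--     # Same parenthesis matching
--     matched = [False] * len(signs)
--     for idx in range(len(signs)):
--         if signs[idx] == '-':
--             for q in range(idx-1, -1, -1):
--                 if signs[q] == '+' and not matched[q]: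
--                     matched[q] = True
--                     matched[idx] = True
--                     break
--     # e_i acts on RIGHTMOST unmatched -
--     target = -1
--     for idx in range(len(signs)-1, -1, -1):
--         if signs[idx] == '-' and not matched[idx]:
--             target = positions[idx]
--             break
--     if target == -1:
--         return None
--     result = list(b)
--     result[target] = i
--     return tuple(result)
-- ===== SOURCE B (Python) =====
-- def crystal_ei(b, i, n, k):
--     """Apply e_i using signature rule for sl_n on a k-tuple.
--
--     Single left-to-right pass: keep a counter of unmatched '+' seen so far
--     (a stack depth); a '-' arriving with counter 0 is unmatched, and the
--     last such '-' is the rightmost unmatched one, i.e. the target.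
--     """
--     open_plus = 0
--     target = -1
--     for pos in range(k):
--         v = b[pos]
--         if v == i:
--             open_plus += 1
--         elif v == i + 1:
--             if open_plus > 0:
--                 open_plus -= 1
--             else:
--                 target = pos
--     if target == -1:
--         return None
--     result = list(b)
--     result[target] = i
--     return tuple(result)
-- ===== Notes on version B (the rewrite author's own statement) =====
-- stated objective: simpler
-- what changed: Replaces A's three-phase signature rule (build signs/positions lists, nested-loop bracket matching marking a matched[] array, then a backward scan for the rightmost unmatched '-') by a single left-to-right pass that keeps only a counter of unmatched '+' and the position of the last '-' seen with counter zero.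
import Mathlib
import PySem

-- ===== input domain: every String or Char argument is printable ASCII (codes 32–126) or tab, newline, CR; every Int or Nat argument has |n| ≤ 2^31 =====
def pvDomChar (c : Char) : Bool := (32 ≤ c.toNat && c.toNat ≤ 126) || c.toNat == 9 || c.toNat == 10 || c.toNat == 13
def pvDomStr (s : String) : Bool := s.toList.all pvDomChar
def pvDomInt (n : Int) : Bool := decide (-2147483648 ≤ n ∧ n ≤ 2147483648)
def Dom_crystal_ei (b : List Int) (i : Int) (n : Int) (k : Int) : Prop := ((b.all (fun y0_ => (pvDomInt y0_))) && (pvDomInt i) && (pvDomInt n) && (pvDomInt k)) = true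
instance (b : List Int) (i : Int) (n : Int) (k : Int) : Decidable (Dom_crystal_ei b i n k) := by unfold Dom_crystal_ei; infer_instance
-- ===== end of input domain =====

-- B replaces A's three-phase bracket matching by a single pass with a counter of unmatched '+'; proved to return the same value wherever A returns.

-- ===== PORT A =====
-- first loop: build signs/positions (b[pos] is in range under Pre_, so .getD 0 is exact there)
def aBuildStep (b : List Int) (i : Int) (sp : List Char × List Int) (pos : Int) : List Char × List Int :=
  let v := (PySem.List.pyGet? b pos).getD 0
  if v = i then (sp.1 ++ ['+'], sp.2 ++ [pos])
  else if v = i + 1 then (sp.1 ++ ['-'], sp.2 ++ [pos])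
  else sp

-- inner loop 'for q in range(idx-1, -1, -1)': first q below idx with an unmatched '+'
def aFindPlus (signs : List Char) (matched : List Bool) : Nat → Option Nat
  | 0 => none
  | q + 1 =>
    if (signs[q]?).getD ' ' = '+' ∧ (matched[q]?).getD true = false then some q
    else aFindPlus signs matched q

-- one iteration of the matching loop (indices in the Python loop are in range; [..]?.getD is exact there)
def aMatchStep (signs : List Char) (matched : List Bool) (idx : Nat) : List Bool :=
  if (signs[idx]?).getD ' ' = '-' then
    match aFindPlus signs matched idx with
    | some q => (matched.set q true).set idx true
    | none => matched
  else matched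

-- the matching loop over idx in range(m)
def aMatchUpto (signs : List Char) (m : Nat) : List Bool :=
  (List.range m).foldl (aMatchStep signs) (List.replicate signs.length false)

-- final loop 'for idx in range(len(signs)-1, -1, -1)': rightmost unmatched '-'
def aTargetScan (signs : List Char) (positions : List Int) (matched : List Bool) : Nat → Int
  | 0 => -1
  | m + 1 =>
    if (signs[m]?).getD ' ' = '-' ∧ (matched[m]?).getD true = false then (positions[m]?).getD 0
    else aTargetScan signs positions matched m

def crystal_ei (b : List Int) (i : Int) (n : Int) (k : Int) : Option (List Int) :=
  let sp := (PySem.List.pyRange 0 k 1).foldl (aBuildStep b i) ([], [])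
  if sp.1 = [] then none
  else
    let matched := aMatchUpto sp.1 sp.1.length
    let target := aTargetScan sp.1 sp.2 matched sp.1.length
    if target = -1 then none
    else some (b.set target.toNat i)

-- ===== PORT B =====
-- single pass: st = (open_plus, target)
def bStep (b : List Int) (i : Int) (st : Int × Int) (pos : Int) : Int × Int :=
  let v := (PySem.List.pyGet? b pos).getD 0
  if v = i then (st.1 + 1, st.2)
  else if v = i + 1 then
    if st.1 > 0 then (st.1 - 1, st.2) else (st.1, pos)
  else st

def crystal_ei_alt (b : List Int) (i : Int) (n : Int) (k : Int) : Option (List Int) :=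
  let st := (PySem.List.pyRange 0 k 1).foldl (bStep b i) (0, -1)
  if st.2 = -1 then none
  else some (b.set st.2.toNat i)

-- ===== PRECONDITION & SPEC =====
-- Python A (and B) raise IndexError at b[pos] as soon as k exceeds len(b); Pre_ excludes exactly those inputs.
def Pre_crystal_ei (b : List Int) (i : Int) (n : Int) (k : Int) : Prop := k ≤ (b.length : Int)
instance (b : List Int) (i : Int) (n : Int) (k : Int) : Decidable (Pre_crystal_ei b i n k) := by unfold Pre_crystal_ei; infer_instance

def pvWitness_crystal_ei : List Int × Int × Int × Int := ([2, 1, 2], 1, 3, 3)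

def Spec_crystal_ei (b : List Int) (i : Int) (n : Int) (k : Int) (out : Option (List Int)) : Prop := out = crystal_ei_alt b i n k
instance (b : List Int) (i : Int) (n : Int) (k : Int) (out : Option (List Int)) : Decidable (Spec_crystal_ei b i n k out) := by unfold Spec_crystal_ei; infer_instance

-- ===== CLAIM (what is proved, stated in full; the proofs are below) =====
def Claim_equal_crystal_ei : Prop := ∀ (b : List Int) (i : Int) (n : Int) (k : Int), Dom_crystal_ei b i n k → Pre_crystal_ei b i n k → Spec_crystal_ei b i n k (crystal_ei b i n k)

-- ===== LEMMAS AND PROOFS =====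

-- the one-pass step, over the filtered (sign, position) pairs
def specStep (st : Int × Int) (cp : Char × Int) : Int × Int :=
  if cp.1 = '+' then (st.1 + 1, st.2)
  else if cp.1 = '-' then (if st.1 > 0 then (st.1 - 1, st.2) else (st.1, cp.2))
  else st

def fPairs (b : List Int) (i : Int) (R : List Int) : List (Char × Int) :=
  R.filterMap (fun pos =>
    if (PySem.List.pyGet? b pos).getD 0 = i then some ('+', pos)
    else if (PySem.List.pyGet? b pos).getD 0 = i + 1 then some ('-', pos) else none)

theorem fPairs_cons (b : List Int) (i : Int) (pos : Int) (R : List Int) :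
    fPairs b i (pos :: R) =
      (if (PySem.List.pyGet? b pos).getD 0 = i then [('+', pos)]
       else if (PySem.List.pyGet? b pos).getD 0 = i + 1 then [('-', pos)] else []) ++ fPairs b i R := by
  simp only [fPairs, List.filterMap_cons]
  split_ifs <;> simp

theorem specStep_plus (st : Int × Int) (pos : Int) : specStep st ('+', pos) = (st.1 + 1, st.2) := by
  simp [specStep]

theorem specStep_minus (st : Int × Int) (pos : Int) :
    specStep st ('-', pos) = if st.1 > 0 then (st.1 - 1, st.2) else (st.1, pos) := by
  simp [specStep]

theorem foldl_bStep_eq (b : List Int) (i : Int) :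
    ∀ (R : List Int) (st : Int × Int), R.foldl (bStep b i) st = (fPairs b i R).foldl specStep st := by
  intro R
  induction R with
  | nil => intro st; simp [fPairs]
  | cons pos R ih =>
    intro st
    rw [List.foldl_cons, fPairs_cons, List.foldl_append]
    by_cases h1 : (PySem.List.pyGet? b pos).getD 0 = i
    · simp only [if_pos h1, List.foldl_cons, List.foldl_nil]
      rw [ih]
      simp [bStep, specStep, h1]
    · by_cases h2 : (PySem.List.pyGet? b pos).getD 0 = i + 1
      · simp only [if_neg h1, if_pos h2, List.foldl_cons, List.foldl_nil]
        rw [ih]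
        by_cases h3 : st.1 > 0 <;> simp [bStep, specStep, h1, h2, h3]
      · simp only [if_neg h1, if_neg h2, List.foldl_nil]
        rw [ih]
        simp [bStep, h1, h2]

theorem foldl_aBuild_eq (b : List Int) (i : Int) :
    ∀ (R : List Int) (sp : List Char × List Int),
      R.foldl (aBuildStep b i) sp =
        (sp.1 ++ (fPairs b i R).map Prod.fst, sp.2 ++ (fPairs b i R).map Prod.snd) := by
  intro R
  induction R with
  | nil => intro sp; simp [fPairs]
  | cons pos R ih =>
    intro sp
    rw [List.foldl_cons, fPairs_cons, ih]
    by_cases h1 : (PySem.List.pyGet? b pos).getD 0 = i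
    · simp [aBuildStep, h1]
    · by_cases h2 : (PySem.List.pyGet? b pos).getD 0 = i + 1
      · simp [aBuildStep, h1, h2]
      · simp [aBuildStep, h1, h2]

theorem gE_lt {α : Type} (l : List α) (m : Nat) (d : α) (h : m < l.length) :
    (l[m]?).getD d = l[m] := by
  rw [List.getElem?_eq_getElem h]
  rfl

theorem gE_set_self {α : Type} (l : List α) (q : Nat) (v d : α) (h : q < l.length) :
    (((l.set q v)[q]?).getD d) = v := by
  rw [List.getElem?_set_self]
  · rfl
  · exact h

theorem gE_set_ne {α : Type} (l : List α) (q r : Nat) (v d : α) (h : r ≠ q) :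
    (((l.set q v)[r]?).getD d) = (l[r]?).getD d := by
  rw [List.getElem?_set_ne (fun hh => h hh.symm)]

theorem aFindPlus_none_iff (s : List Char) (matched : List Bool) :
    ∀ m, aFindPlus s matched m = none ↔
      ∀ q, q < m → ¬((s[q]?).getD ' ' = '+' ∧ (matched[q]?).getD true = false) := by
  intro m
  induction m with
  | zero =>
    exact iff_of_true rfl (fun q hq => absurd hq (Nat.not_lt_zero q))
  | succ m ih =>
    by_cases h : (s[m]?).getD ' ' = '+' ∧ (matched[m]?).getD true = false
    · rw [aFindPlus, if_pos h]
      exact iff_of_false (by simp) (fun hall => hall m (by omega) h)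
    · rw [aFindPlus, if_neg h, ih]
      constructor
      · intro hall q hq
        rcases Nat.lt_succ_iff_lt_or_eq.mp hq with hq | hq
        · exact hall q hq
        · subst hq; exact h
      · intro hall q hq; exact hall q (by omega)

theorem aFindPlus_some (s : List Char) (matched : List Bool) :
    ∀ m q, aFindPlus s matched m = some q →
      q < m ∧ (s[q]?).getD ' ' = '+' ∧ (matched[q]?).getD true = false := by
  intro m
  induction m with
  | zero => intro q hq; simp [aFindPlus] at hq
  | succ m ih =>
    intro q hq
    by_cases h : (s[m]?).getD ' ' = '+' ∧ (matched[m]?).getD true = false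
    · rw [aFindPlus, if_pos h] at hq
      have : m = q := by simpa using hq
      subst this
      exact ⟨by omega, h⟩
    · rw [aFindPlus, if_neg h] at hq
      obtain ⟨h1, h2⟩ := ih q hq
      exact ⟨by omega, h2⟩

theorem countP_set_dec (p p' : Nat → Bool) :
    ∀ (l : List Nat) (q : Nat), l.Nodup → q ∈ l → p q = true → p' q = false →
      (∀ r ∈ l, r ≠ q → p' r = p r) → l.countP p' + 1 = l.countP p := by
  intro l
  induction l with
  | nil => intro q _ hq; simp at hq
  | cons a t ih =>
    intro q hnd hq hpq hp'q hagree
    rcases List.mem_cons.mp hq with hq | hq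
    · subst hq
      have hqt : q ∉ t := (List.nodup_cons.mp hnd).1
      have hcong : t.countP p' = t.countP p := by
        apply List.countP_congr
        intro r hr
        rw [hagree r (List.mem_cons_of_mem _ hr) (fun h => hqt (h ▸ hr))]
      simp [List.countP_cons, hpq, hp'q, hcong]
    · have haq : a ≠ q := by
        rintro rfl; exact (List.nodup_cons.mp hnd).1 hq
      have hrec := ih q (List.nodup_cons.mp hnd).2 hq hpq hp'q
        (fun r hr hrq => hagree r (List.mem_cons_of_mem _ hr) hrq)
      rw [List.countP_cons, List.countP_cons, hagree a List.mem_cons_self haq]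
      omega

theorem aTargetScan_congr (s : List Char) (p : List Int) (matched matched' : List Bool) :
    ∀ m, (∀ r, r < m → (s[r]?).getD ' ' = '-' → (matched'[r]?).getD true = (matched[r]?).getD true) →
      aTargetScan s p matched' m = aTargetScan s p matched m := by
  intro m
  induction m with
  | zero => intro _; rfl
  | succ m ih =>
    intro hag
    rw [aTargetScan, aTargetScan]
    by_cases h : (s[m]?).getD ' ' = '-'
    · rw [hag m (by omega) h, ih (fun r hr => hag r (by omega))]
    · rw [if_neg (fun hc => h hc.1), if_neg (fun hc => h hc.1),
        ih (fun r hr => hag r (by omega))]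

theorem aMatchUpto_succ (s : List Char) (m : Nat) :
    aMatchUpto s (m + 1) = aMatchStep s (aMatchUpto s m) m := by
  simp [aMatchUpto, List.range_succ]

-- the central invariant: A's matching state, summarised by (unmatched-'+' count, rightmost unmatched '-'),
-- is exactly the fold of the one-pass step over the sign/position pairs
theorem core (s : List Char) (p : List Int) (hl : p.length = s.length) :
    ∀ m, m ≤ s.length →
      (aMatchUpto s m).length = s.length ∧
      (∀ q, m ≤ q → q < s.length → ((aMatchUpto s m)[q]?).getD true = false) ∧
      ((s.zip p).take m).foldl specStep (0, -1) =
        ((((List.range m).countP fun q =>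
            decide ((s[q]?).getD ' ' = '+' ∧ ((aMatchUpto s m)[q]?).getD true = false)) : Int),
         aTargetScan s p (aMatchUpto s m) m) := by
  intro m
  induction m with
  | zero =>
    intro _
    refine ⟨by simp [aMatchUpto], ?_, by simp [aMatchUpto, aTargetScan]⟩
    intro q _ hq
    simp [aMatchUpto, List.getElem?_replicate, hq]
  | succ m ih =>
    intro hm
    obtain ⟨ihlen, ihfresh, ihspec⟩ := ih (by omega)
    have hmlt : m < s.length := by omega
    have hmp : m < p.length := by omega
    have hmz : m < (s.zip p).length := by
      rw [List.length_zip]; omega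
    set M := aMatchUpto s m with hM
    have hsm : (s[m]?).getD ' ' = s[m] := gE_lt s m ' ' hmlt
    have hpm : (p[m]?).getD 0 = p[m] := gE_lt p m 0 hmp
    have hMm : (M[m]?).getD true = false := ihfresh m (by omega) hmlt
    have htake : (s.zip p).take (m + 1) = (s.zip p).take m ++ [(s[m], p[m])] := by
      rw [List.take_succ]
      simp [List.getElem?_eq_getElem hmz, List.getElem_zip]
    rw [aMatchUpto_succ, htake, List.foldl_append, ihspec, ← hM]
    simp only [List.foldl_cons, List.foldl_nil]
    by_cases hplus : (s[m]?).getD ' ' = '+'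
    · -- '+' case: matching loop does nothing, count goes up by one
      have hstep : aMatchStep s M m = M := by
        rw [aMatchStep, if_neg]
        rw [hplus]; decide
      rw [hstep]
      refine ⟨ihlen, fun q hq hq2 => ihfresh q (by omega) hq2, ?_⟩
      have hcnt : ((List.range (m + 1)).countP fun q =>
          decide ((s[q]?).getD ' ' = '+' ∧ (M[q]?).getD true = false)) =
          ((List.range m).countP fun q =>
          decide ((s[q]?).getD ' ' = '+' ∧ (M[q]?).getD true = false)) + 1 := by
        rw [List.range_succ, List.countP_append]
        simp [hplus, hMm]
      rw [hcnt, aTargetScan, if_neg (fun hc => by rw [hplus] at hc; exact absurd hc.1 (by decide))]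
      rw [show s[m] = '+' from hsm ▸ hplus, specStep_plus]
      dsimp only
      rw [Prod.mk.injEq]
      constructor
      · push_cast; ring
      · rfl
    · by_cases hminus : (s[m]?).getD ' ' = '-'
      · -- '-' case
        have hsmne : s[m] ≠ '+' := by rw [← hsm, hminus]; decide
        have hsmm : s[m] = '-' := by rw [← hsm, hminus]
        rcases hfind : aFindPlus s M m with _ | q
        · -- no unmatched '+': counter is 0, target becomes p[m]
          have hzero : ((List.range m).countP fun q =>
              decide ((s[q]?).getD ' ' = '+' ∧ (M[q]?).getD true = false)) = 0 := by
            rw [List.countP_eq_zero]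
            intro q hq
            simpa using (aFindPlus_none_iff s M m).mp hfind q (List.mem_range.mp hq)
          have hstep : aMatchStep s M m = M := by
            rw [aMatchStep, if_pos hminus, hfind]
          rw [hstep]
          refine ⟨ihlen, fun q hq hq2 => ihfresh q (by omega) hq2, ?_⟩
          have hcm1 : ((List.range (m + 1)).countP fun q =>
              decide ((s[q]?).getD ' ' = '+' ∧ (M[q]?).getD true = false)) = 0 := by
            rw [List.range_succ, List.countP_append, hzero]
            simp [hminus]
          rw [hcm1, aTargetScan, if_pos ⟨hminus, hMm⟩, hzero, hpm]
          simp [specStep, hsmm]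
        · -- matched with the nearest unmatched '+': counter drops by one
          obtain ⟨hqm, hqplus, hqM⟩ := aFindPlus_some s M m q hfind
          have hstep : aMatchStep s M m = (M.set q true).set m true := by
            rw [aMatchStep, if_pos hminus, hfind]
          rw [hstep]
          set M' := (M.set q true).set m true with hM'
          have hlen' : M'.length = s.length := by
            rw [hM', List.length_set, List.length_set, ihlen]
          have hqlen : q < M.length := by omega
          have hqne : q ≠ m := by omega
          have hM'q : (M'[q]?).getD true = true := by
            rw [hM', gE_set_ne _ m q true true hqne, gE_set_self _ q true true hqlen]
          have hM'm : (M'[m]?).getD true = true := by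
            rw [hM', gE_set_self _ m true true (by rw [List.length_set, ihlen]; omega)]
          have hM'other : ∀ r, r ≠ q → r ≠ m → (M'[r]?).getD true = (M[r]?).getD true := by
            intro r h1 h2
            rw [hM', gE_set_ne _ m r true true h2, gE_set_ne _ q r true true h1]
          refine ⟨hlen', ?_, ?_⟩
          · intro r hr hr2
            rw [hM'other r (by omega) (by omega)]
            exact ihfresh r (by omega) hr2
          · have hpos : 0 < ((List.range m).countP fun r =>
                decide ((s[r]?).getD ' ' = '+' ∧ (M[r]?).getD true = false)) := by
              rw [List.countP_pos_iff]
              exact ⟨q, List.mem_range.mpr hqm, by simp [hqplus, hqM]⟩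
            have hdec : ((List.range (m + 1)).countP fun r =>
                decide ((s[r]?).getD ' ' = '+' ∧ (M'[r]?).getD true = false)) + 1 =
                ((List.range m).countP fun r =>
                decide ((s[r]?).getD ' ' = '+' ∧ (M[r]?).getD true = false)) := by
              have h1 : ((List.range (m + 1)).countP fun r =>
                  decide ((s[r]?).getD ' ' = '+' ∧ (M'[r]?).getD true = false)) =
                  ((List.range m).countP fun r =>
                  decide ((s[r]?).getD ' ' = '+' ∧ (M'[r]?).getD true = false)) := by
                rw [List.range_succ, List.countP_append]
                simp [hminus]
              rw [h1]
              apply countP_set_dec _ _ _ q List.nodup_range (List.mem_range.mpr hqm)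
              · simp [hqplus, hqM]
              · simp [hM'q]
              · intro r hr hrq
                have hrm : r ≠ m := by have := List.mem_range.mp hr; omega
                simp [hM'other r hrq hrm]
            have hscan : aTargetScan s p M' (m + 1) = aTargetScan s p M m := by
              rw [aTargetScan, if_neg (fun hc => by rw [hM'm] at hc; exact absurd hc.2 (by decide))]
              apply aTargetScan_congr
              intro r hr hrminus
              rcases eq_or_ne r q with rfl | hrq
              · rw [hqplus] at hrminus; exact absurd hrminus (by decide)
              · exact hM'other r hrq (by omega)
            rw [hscan, hsmm, specStep_minus, if_pos (by simpa using hpos)]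
            dsimp only
            rw [Prod.mk.injEq]
            constructor
            · omega
            · rfl
      · -- neither '+' nor '-': untouched on both sides
        have hstep : aMatchStep s M m = M := by rw [aMatchStep, if_neg hminus]
        rw [hstep]
        refine ⟨ihlen, fun q hq hq2 => ihfresh q (by omega) hq2, ?_⟩
        have hcnt : ((List.range (m + 1)).countP fun q =>
            decide ((s[q]?).getD ' ' = '+' ∧ (M[q]?).getD true = false)) =
            ((List.range m).countP fun q =>
            decide ((s[q]?).getD ' ' = '+' ∧ (M[q]?).getD true = false)) := by
          rw [List.range_succ, List.countP_append]
          simp [hplus]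
        have hne1 : s[m] ≠ '+' := by rw [← hsm]; exact hplus
        have hne2 : s[m] ≠ '-' := by rw [← hsm]; exact hminus
        rw [hcnt, aTargetScan, if_neg (fun hc => hminus hc.1)]
        simp [specStep, hne1, hne2]

theorem zip_map_fst_snd {α β : Type} (l : List (α × β)) :
    (l.map Prod.fst).zip (l.map Prod.snd) = l := by
  induction l with
  | nil => rfl
  | cons a t ih => simp [ih]

-- ===== VERDICT (by name: the statement is the Claim_ definition above) =====
theorem crystal_ei_spec : Claim_equal_crystal_ei := by
  intro b i n k _ _
  unfold Spec_crystal_ei crystal_ei crystal_ei_alt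
  set R := PySem.List.pyRange 0 k 1 with hR
  set L := fPairs b i R with hL
  set s := L.map Prod.fst with hs
  set p := L.map Prod.snd with hp
  have hsp : R.foldl (aBuildStep b i) ([], []) = (s, p) := by
    rw [foldl_aBuild_eq]
    simp [hs, hp, hL]
  have hzip : s.zip p = L := zip_map_fst_snd L
  have hlp : p.length = s.length := by simp [hs, hp]
  have hLlen : L.length = s.length := by simp [hs]
  have hfold : R.foldl (bStep b i) (0, -1) = L.foldl specStep (0, -1) := by
    rw [foldl_bStep_eq, hL]
  obtain ⟨_, _, hspec⟩ := core s p hlp s.length (le_refl _)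
  have htake : (s.zip p).take s.length = L := by
    rw [hzip, ← hLlen, List.take_length]
  rw [htake] at hspec
  have hT : (R.foldl (bStep b i) (0, -1)).2 =
      aTargetScan s p (aMatchUpto s s.length) s.length := by
    rw [hfold, hspec]
  rw [hsp]
  by_cases hnil : s = []
  · rw [if_pos hnil]
    have hmapnil : L.map Prod.fst = [] := by rw [← hs]; exact hnil
    rw [hfold, List.map_eq_nil_iff.mp hmapnil]
    simp
  · rw [if_neg hnil]
    dsimp only
    rw [hT]
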